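-- pv_equiv track=rewrite | github.com/Rolaand-Jayz/RJW-IDD-Starter | tools/testing/living_docs_guard.py | classify_changes
-- ===== SOURCE A (Python) =====
-- from typing import Iterable, List
--
-- DOC_PATH_PREFIXES = ("docs/", "specs/")
--
-- DOC_EXEMPTIONS = {"templates-and-examples/templates/change-logs/CHANGELOG-template.md"}
--
-- IGNORED_PREFIXES = ("workspace/", "sandbox/", "tmp/")
--
-- def classify_changes(paths: Iterable[str]) -> tuple[list[str], list[str]]:
--     doc_updates: list[str] = []
--     relevant: list[str] = []
--     for path in paths:
--         if any(path.startswith(prefix) for prefix in IGNORED_PREFIXES):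
--             continue
--         relevant.append(path)
--         if any(path.startswith(prefix) for prefix in DOC_PATH_PREFIXES) and path not in DOC_EXEMPTIONS:
--             doc_updates.append(path)
--     non_doc = [path for path in relevant if path not in doc_updates and path not in DOC_EXEMPTIONS]
--     return doc_updates, non_doc
-- ===== SOURCE B (Python) =====
-- DOC_PATH_PREFIXES = ("docs/", "specs/")
-- DOC_EXEMPTIONS = {"templates-and-examples/templates/change-logs/CHANGELOG-template.md"}
-- IGNORED_PREFIXES = ("workspace/", "sandbox/", "tmp/")
--
-- def classify_changes(paths):
--     doc_updates = []
--     non_doc = []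
--     for path in paths:
--         if path.startswith(IGNORED_PREFIXES) or path in DOC_EXEMPTIONS:
--             continue
--         if path.startswith(DOC_PATH_PREFIXES):
--             doc_updates.append(path)
--         else:
--             non_doc.append(path)
--     return doc_updates, non_doc
-- ===== Notes on version B (the rewrite author's own statement) =====
-- stated objective: faster
-- what changed: Single loop deciding each path locally (skip ignored/exempt, then doc-prefix vs not) instead of A's build-then-filter whose 'path not in doc_updates' list-membership scan makes it quadratic.
import Mathlib
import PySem

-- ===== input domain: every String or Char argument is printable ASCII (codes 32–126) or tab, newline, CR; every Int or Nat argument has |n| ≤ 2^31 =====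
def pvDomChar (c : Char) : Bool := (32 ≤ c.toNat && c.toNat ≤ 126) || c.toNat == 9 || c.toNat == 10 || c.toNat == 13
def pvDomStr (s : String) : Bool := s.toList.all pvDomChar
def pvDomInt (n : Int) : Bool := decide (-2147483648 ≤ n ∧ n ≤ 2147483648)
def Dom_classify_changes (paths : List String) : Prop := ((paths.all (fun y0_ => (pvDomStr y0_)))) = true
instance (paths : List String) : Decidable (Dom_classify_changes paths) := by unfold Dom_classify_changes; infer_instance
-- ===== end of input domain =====

-- B replaces A's build-then-filter (whose 'path not in doc_updates' list scan is quadratic) by one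
-- linear loop deciding each path locally; objective: faster (measured).

-- ===== PORT A =====
def pvDocPrefixes : List String := ["docs/", "specs/"]
def pvExemptions : PySem.Set String :=
  PySem.Set.ofList ["templates-and-examples/templates/change-logs/CHANGELOG-template.md"]
def pvIgnoredPrefixes : List String := ["workspace/", "sandbox/", "tmp/"]

def pvIgn (p : String) : Bool := pvIgnoredPrefixes.any (fun q => PySem.Str.startswith p q)
def pvDoc (p : String) : Bool := pvDocPrefixes.any (fun q => PySem.Str.startswith p q)
def pvEx (p : String) : Bool := PySem.Set.contains pvExemptions p

def pvStepA (st : List String × List String) (path : String) : List String × List String :=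
  if pvIgn path then st
  else
    let rel := st.2 ++ [path]
    if pvDoc path && !pvEx path then (st.1 ++ [path], rel) else (st.1, rel)

def classify_changes (paths : List String) : List String × List String :=
  let st := paths.foldl pvStepA ([], [])
  let non_doc := st.2.filter (fun p => !(st.1.contains p) && !(pvEx p))
  (st.1, non_doc)

-- ===== PORT B =====
def pvStepB (st : List String × List String) (path : String) : List String × List String :=
  if pvIgn path || pvEx path then st
  else if pvDoc path then (st.1 ++ [path], st.2) else (st.1, st.2 ++ [path])

def classify_changes_alt (paths : List String) : List String × List String :=
  paths.foldl pvStepB ([], [])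

-- ===== PRECONDITION & SPEC =====
def Spec_classify_changes (paths : List String) (out : List String × List String) : Prop := out = classify_changes_alt paths
instance (paths : List String) (out : List String × List String) : Decidable (Spec_classify_changes paths out) := by unfold Spec_classify_changes; infer_instance

-- ===== CLAIM (what is proved, stated in full; the proofs are below) =====
def Claim_equal_classify_changes : Prop := ∀ (paths : List String), Dom_classify_changes paths → Spec_classify_changes paths (classify_changes paths)

-- ===== LEMMAS AND PROOFS =====

lemma foldA_eq (paths : List String) : ∀ (d r : List String),
    paths.foldl pvStepA (d, r) =
      (d ++ (paths.filter (fun p => !pvIgn p)).filter (fun p => pvDoc p && !pvEx p),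
       r ++ paths.filter (fun p => !pvIgn p)) := by
  induction paths with
  | nil => intro d r; simp
  | cons p rest ih =>
    intro d r
    simp only [List.foldl_cons, pvStepA]
    cases hign : pvIgn p with
    | true => simp [hign, ih d r]
    | false =>
      cases hdoc : (pvDoc p && !pvEx p) with
      | true => simp [hign, hdoc, ih (d ++ [p]) (r ++ [p]), List.filter_cons]
      | false => simp [hign, hdoc, ih d (r ++ [p]), List.filter_cons]

lemma foldB_eq (paths : List String) : ∀ (d n : List String),
    paths.foldl pvStepB (d, n) =
      (d ++ paths.filter (fun p => !(pvIgn p || pvEx p) && pvDoc p),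
       n ++ paths.filter (fun p => !(pvIgn p || pvEx p) && !pvDoc p)) := by
  induction paths with
  | nil => intro d n; simp
  | cons p rest ih =>
    intro d n
    simp only [List.foldl_cons, pvStepB]
    cases hskip : (pvIgn p || pvEx p) with
    | true =>
      have h1 : (!(pvIgn p || pvEx p) && pvDoc p) = false := by rw [hskip]; rfl
      have h2 : (!(pvIgn p || pvEx p) && !pvDoc p) = false := by rw [hskip]; rfl
      rw [List.filter_cons, List.filter_cons, h1, h2]
      simp [hskip, ih d n]
    | false =>
      obtain ⟨h1, h2⟩ := Bool.or_eq_false_iff.mp hskip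
      cases hdoc : pvDoc p with
      | true => simp [h1, h2, hdoc, ih (d ++ [p]) n, List.filter_cons]
      | false => simp [h1, h2, hdoc, ih d (n ++ [p]), List.filter_cons]

lemma doc_lists_eq (paths : List String) :
    (paths.filter (fun p => !pvIgn p)).filter (fun p => pvDoc p && !pvEx p) =
      paths.filter (fun p => !(pvIgn p || pvEx p) && pvDoc p) := by
  rw [List.filter_filter]
  apply List.filter_congr
  intro p _
  cases pvIgn p <;> cases pvEx p <;> cases pvDoc p <;> rfl

lemma mem_doc_iff (paths : List String) (p : String)
    (hp : p ∈ paths.filter (fun p => !pvIgn p)) :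
    (((paths.filter (fun p => !pvIgn p)).filter (fun p => pvDoc p && !pvEx p)).contains p)
      = (pvDoc p && !pvEx p) := by
  cases h : (pvDoc p && !pvEx p) with
  | true =>
    have hmem : p ∈ (paths.filter (fun p => !pvIgn p)).filter (fun p => pvDoc p && !pvEx p) :=
      List.mem_filter.mpr ⟨hp, h⟩
    simp only [List.contains_eq_mem, decide_eq_true_eq]
    exact hmem
  | false =>
    simp only [List.contains_eq_mem, decide_eq_false_iff_not]
    intro hmem
    have h2 := (List.mem_filter.mp hmem).2
    simp [h] at h2

lemma non_doc_eq (paths : List String) :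
    (paths.filter (fun p => !pvIgn p)).filter
        (fun p => !(((paths.filter (fun p => !pvIgn p)).filter (fun p => pvDoc p && !pvEx p)).contains p)
          && !(pvEx p)) =
      paths.filter (fun p => !(pvIgn p || pvEx p) && !pvDoc p) := by
  have h1 : (paths.filter (fun p => !pvIgn p)).filter
        (fun p => !(((paths.filter (fun p => !pvIgn p)).filter (fun p => pvDoc p && !pvEx p)).contains p)
          && !(pvEx p)) =
      (paths.filter (fun p => !pvIgn p)).filter (fun p => !(pvDoc p && !pvEx p) && !pvEx p) := by
    apply List.filter_congr
    intro p hp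
    rw [mem_doc_iff paths p hp]
  rw [h1, List.filter_filter]
  apply List.filter_congr
  intro p _
  cases pvIgn p <;> cases pvEx p <;> cases pvDoc p <;> rfl

-- ===== VERDICT (by name: the statement is the Claim_ definition above) =====
theorem classify_changes_spec : Claim_equal_classify_changes := by
  intro paths _
  unfold Spec_classify_changes classify_changes classify_changes_alt
  rw [foldA_eq paths [] [], foldB_eq paths [] []]
  simp only [List.nil_append]
  exact congrArg₂ Prod.mk (doc_lists_eq paths) (non_doc_eq paths)
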